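-- pv_equiv track=rewrite | github.com/Shigeru430/numbers-ai-v7 | app.py | judge_prediction
-- ===== SOURCE A (Python) =====
-- def judge_prediction(pred_list: list[str], actual: str | None) -> str:
--     if actual in [None, "", "---", "-"]:
--         return "-"
--
--     hit = str(actual)
--
--     for pred in pred_list:
--         pred = str(pred)
--
--         if pred == hit:
--             return "◎"
--
--         if sorted(pred) == sorted(hit):
--             return "〇"
--
--     best_pos_match = 0
--     best_digit_match = 0
--
--     for pred in pred_list:
--         pred = str(pred)
--         pos_match = sum(1 for a, b in zip(pred, hit) if a == b)
--
--         hit_chars = list(hit)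
--         digit_match = 0
--
--         for ch in pred:
--             if ch in hit_chars:
--                 digit_match += 1
--                 hit_chars.remove(ch)
--
--         best_pos_match = max(best_pos_match, pos_match)
--         best_digit_match = max(best_digit_match, digit_match)
--
--     if len(hit) == 3 and best_pos_match >= 2:
--         return "▲"
--
--     if len(hit) == 4 and best_pos_match >= 3:
--         return "▲"
--
--     if best_digit_match >= 2:
--         return "△"
--
--     if best_digit_match >= 1:
--         return "※"
--
--     return "×"
-- ===== SOURCE B (Python) =====
-- def judge_prediction(pred_list: list[str], actual: str | None) -> str:
--     if actual in [None, "", "---", "-"]: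
--         return "-"
--
--     hit = str(actual)
--     hit_list = list(hit)
--
--     best_pos = 0
--     best_dig = 0
--     for pred in pred_list:
--         pred = str(pred)
--         if pred == hit:
--             return "◎"
--         if sorted(pred) == sorted(hit):
--             return "〇"
--         pred_list_chars = list(pred)
--         pos = sum(1 for a, b in zip(pred_list_chars, hit_list) if a == b)
--         dig = sum(min(pred_list_chars.count(c), hit_list.count(c))
--                   for c in dict.fromkeys(pred_list_chars))
--         if pos > best_pos:
--             best_pos = pos
--         if dig > best_dig:
--             best_dig = dig
--
--     if len(hit) == 3 and best_pos >= 2: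
--         return "▲"
--     if len(hit) == 4 and best_pos >= 3:
--         return "▲"
--     if best_dig >= 2:
--         return "△"
--     if best_dig >= 1:
--         return "※"
--     return "×"
-- ===== Notes on version B (the rewrite author's own statement) =====
-- stated objective: alternative
-- what changed: B replaces A's two sequential passes over pred_list with a single loop that returns the exact/anagram verdicts early and maintains the two running maxima, and computes the digit match as a sum of per-character minimum counts over the distinct characters of pred instead of A's destructive greedy removal from a mutable copy of the hit string.
import Mathlib
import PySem

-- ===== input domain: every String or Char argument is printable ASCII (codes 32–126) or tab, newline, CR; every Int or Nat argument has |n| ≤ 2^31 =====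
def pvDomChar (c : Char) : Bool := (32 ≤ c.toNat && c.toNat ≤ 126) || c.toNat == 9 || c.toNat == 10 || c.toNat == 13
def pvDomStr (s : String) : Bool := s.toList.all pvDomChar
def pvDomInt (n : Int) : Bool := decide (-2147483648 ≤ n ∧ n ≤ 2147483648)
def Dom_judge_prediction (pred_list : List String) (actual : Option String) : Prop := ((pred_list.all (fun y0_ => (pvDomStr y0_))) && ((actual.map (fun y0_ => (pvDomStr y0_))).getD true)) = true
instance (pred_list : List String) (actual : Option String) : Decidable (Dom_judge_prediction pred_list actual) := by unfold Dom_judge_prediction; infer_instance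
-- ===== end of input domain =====

-- B replaces A's two sequential passes by a single loop with early exit, and computes the
-- digit match as a sum of per-character minimum counts over the distinct characters instead
-- of A's destructive greedy removal from a mutable copy of the hit string (same results).

-- ===== PORT A =====
-- first loop of A: returns the first exact/anagram verdict, none if no pred matches
def firstLoopA (hit : String) : List String → Option String
  | [] => none
  | p :: rest =>
    if p = hit then some "◎"
    else if PySem.List.sorted p.toList (fun c => c) false
          = PySem.List.sorted hit.toList (fun c => c) false then some "〇"
    else firstLoopA hit rest

-- pos_match = sum(1 for a, b in zip(pred, hit) if a == b)
def posMatchA (pred hit : List Char) : Nat :=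
  (pred.zip hit).foldl (fun acc ab => if ab.1 = ab.2 then acc + 1 else acc) 0

-- inner for-loop of A: greedy removal of matched chars from hit_chars
def dmA : List Char → List Char → Nat
  | [], _ => 0
  | ch :: rest, hc => if ch ∈ hc then dmA rest (hc.erase ch) + 1 else dmA rest hc

-- second loop of A: accumulates best_pos_match and best_digit_match
def bestsA (hit : String) : List String → Nat × Nat → Nat × Nat
  | [], st => st
  | p :: rest, st =>
      bestsA hit rest (max st.1 (posMatchA p.toList hit.toList), max st.2 (dmA p.toList hit.toList))

def classifyA (hitLen bp bd : Nat) : String :=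
  if hitLen = 3 ∧ bp ≥ 2 then "▲"
  else if hitLen = 4 ∧ bp ≥ 3 then "▲"
  else if bd ≥ 2 then "△"
  else if bd ≥ 1 then "※"
  else "×"

def judge_prediction (pred_list : List String) (actual : Option String) : String :=
  match actual with
  | none => "-"
  | some hit =>
    if hit = "" ∨ hit = "---" ∨ hit = "-" then "-"
    else
      match firstLoopA hit pred_list with
      | some r => r
      | none =>
        let st := bestsA hit pred_list (0, 0)
        classifyA hit.toList.length st.1 st.2

-- ===== PORT B =====
-- digit match as Σ over distinct chars of pred of min(count in pred, count in hit)
def dmB (pred hit : List Char) : Nat :=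
  ((PySem.List.dedup pred).map (fun c => min (pred.count c) (hit.count c))).sum

def posMatchB (pred hit : List Char) : Nat :=
  (pred.zip hit).foldl (fun acc ab => if ab.1 = ab.2 then acc + 1 else acc) 0

def classifyB (hitLen bp bd : Nat) : String :=
  if hitLen = 3 ∧ bp ≥ 2 then "▲"
  else if hitLen = 4 ∧ bp ≥ 3 then "▲"
  else if bd ≥ 2 then "△"
  else if bd ≥ 1 then "※"
  else "×"

-- single pass of B: early verdicts, otherwise maintain the two running maxima
def bLoop (hit : String) : List String → Nat → Nat → String
  | [], bp, bd => classifyB hit.toList.length bp bd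
  | p :: rest, bp, bd =>
    if p = hit then "◎"
    else if PySem.List.sorted p.toList (fun c => c) false
          = PySem.List.sorted hit.toList (fun c => c) false then "〇"
    else
      let pos := posMatchB p.toList hit.toList
      let dig := dmB p.toList hit.toList
      bLoop hit rest (if pos > bp then pos else bp) (if dig > bd then dig else bd)

def judge_prediction_alt (pred_list : List String) (actual : Option String) : String :=
  match actual with
  | none => "-"
  | some hit =>
    if hit = "" ∨ hit = "---" ∨ hit = "-" then "-"
    else bLoop hit pred_list 0 0

-- ===== PRECONDITION & SPEC =====
def Spec_judge_prediction (pred_list : List String) (actual : Option String) (out : String) : Prop := out = judge_prediction_alt pred_list actual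
instance (pred_list : List String) (actual : Option String) (out : String) : Decidable (Spec_judge_prediction pred_list actual out) := by unfold Spec_judge_prediction; infer_instance

-- ===== CLAIM (what is proved, stated in full; the proofs are below) =====
def Claim_equal_judge_prediction : Prop := ∀ (pred_list : List String) (actual : Option String), Dom_judge_prediction pred_list actual → Spec_judge_prediction pred_list actual (judge_prediction pred_list actual)

-- ===== LEMMAS AND PROOFS =====

-- A's greedy removal count is the cardinality of the multiset intersection
lemma dmA_eq_card_inter : ∀ (pred hc : List Char),
    dmA pred hc = Multiset.card ((pred : Multiset Char) ∩ (hc : Multiset Char)) := by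
  intro pred
  induction pred with
  | nil => intro hc; simp [dmA]
  | cons ch rest ih =>
    intro hc
    have hcons : ((ch :: rest : List Char) : Multiset Char) = ch ::ₘ (rest : Multiset Char) := rfl
    by_cases h : ch ∈ hc
    · have hm : ch ∈ (hc : Multiset Char) := by simpa using h
      simp only [dmA, if_pos h, ih]
      rw [hcons, Multiset.cons_inter_of_pos _ hm, Multiset.card_cons, Multiset.coe_erase]
    · have hm : ch ∉ (hc : Multiset Char) := by simpa using h
      simp only [dmA, if_neg h, ih]
      rw [hcons, Multiset.cons_inter_of_neg _ hm]

-- B's sum of minima is the same cardinality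
lemma dmB_eq_card_inter (pred hc : List Char) :
    dmB pred hc = Multiset.card ((pred : Multiset Char) ∩ (hc : Multiset Char)) := by
  classical
  set s : Multiset Char := (pred : Multiset Char)
  set t : Multiset Char := (hc : Multiset Char)
  have hcard : Multiset.card (s ∩ t) = ∑ a ∈ (s ∩ t).toFinset, (s ∩ t).count a :=
    (Multiset.toFinset_sum_count_eq _).symm
  have hsub : (s ∩ t).toFinset ⊆ pred.toFinset := by
    intro a ha
    simp only [Multiset.mem_toFinset, Multiset.mem_inter] at ha
    simp only [List.mem_toFinset]
    simpa [s, Multiset.mem_coe] using ha.1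
  have hext : ∑ a ∈ (s ∩ t).toFinset, (s ∩ t).count a = ∑ a ∈ pred.toFinset, (s ∩ t).count a := by
    refine Finset.sum_subset hsub ?_
    intro a _ ha
    rw [Multiset.count_eq_zero]
    simpa [Multiset.mem_toFinset] using ha
  have hmin : ∀ a, (s ∩ t).count a = min (pred.count a) (hc.count a) := by
    intro a
    simp [s, t, Multiset.coe_count]
  -- list side: sum over dedup equals Finset sum over toFinset
  have hnd : (PySem.List.dedup pred).Nodup := PySem.List.nodup_dedup pred
  have htf : (PySem.List.dedup pred).toFinset = pred.toFinset := by
    ext a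
    simp [List.mem_toFinset]
  have hlist : dmB pred hc = ∑ a ∈ pred.toFinset, min (pred.count a) (hc.count a) := by
    rw [dmB, ← htf, ← List.sum_toFinset (fun a => min (pred.count a) (hc.count a)) hnd]
  rw [hlist, hcard, hext]
  exact (Finset.sum_congr rfl (fun a _ => (hmin a))).symm

lemma dm_eq (pred hc : List Char) : dmB pred hc = dmA pred hc := by
  rw [dmB_eq_card_inter, dmA_eq_card_inter]

lemma max_eq_if (a b : Nat) : (if b > a then b else a) = max a b := by
  rcases Nat.lt_or_ge a b with h | h
  · simp [h, Nat.max_eq_right (Nat.le_of_lt h)]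
  · simp [Nat.not_lt.mpr h, Nat.max_eq_left h]

lemma bLoop_eq (hit : String) : ∀ (preds : List String) (bp bd : Nat),
    bLoop hit preds bp bd =
      match firstLoopA hit preds with
      | some r => r
      | none => (fun st => classifyA hit.toList.length st.1 st.2) (bestsA hit preds (bp, bd)) := by
  intro preds
  induction preds with
  | nil => intro bp bd; simp [bLoop, firstLoopA, bestsA, classifyB, classifyA]
  | cons p rest ih =>
    intro bp bd
    by_cases h1 : p = hit
    · simp [bLoop, firstLoopA, h1]
    · by_cases h2 : PySem.List.sorted p.toList (fun c => c) false
          = PySem.List.sorted hit.toList (fun c => c) false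
      · simp [bLoop, firstLoopA, h1, h2]
      · have hacc : ((if posMatchB p.toList hit.toList > bp then posMatchB p.toList hit.toList else bp),
            (if dmB p.toList hit.toList > bd then dmB p.toList hit.toList else bd))
            = (max bp (posMatchA p.toList hit.toList), max bd (dmA p.toList hit.toList)) := by
          rw [max_eq_if, max_eq_if, dm_eq]
          rfl
        simp only [bLoop, firstLoopA, if_neg h1, if_neg h2, bestsA]
        rw [ih, hacc]

-- ===== VERDICT (by name: the statement is the Claim_ definition above) =====
theorem judge_prediction_spec : Claim_equal_judge_prediction := by
  intro pred_list actual _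
  unfold Spec_judge_prediction judge_prediction judge_prediction_alt
  cases actual with
  | none => rfl
  | some hit =>
    by_cases hg : hit = "" ∨ hit = "---" ∨ hit = "-"
    · simp [hg]
    · simp only [if_neg hg]
      rw [bLoop_eq]
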